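-- pv_equiv track=rewrite | github.com/0d-fako/CXBackend | api/Hennge/main.py | process_test_cases
-- ===== SOURCE A (Python) =====
-- def power_of_four(n):
--     return n ** 4 if n < 0 else 0
--
-- def process_test_cases(test_cases, index=0, results=[]):
--     if index >= len(test_cases):
--         return results
--
--     tc = test_cases[index]
--     if len(tc) != tc[0] + 1:
--         return process_test_cases(test_cases, index + 1, results + [-1])
--
--     def calculate_sum(tc, i=1, result=0):
--         if i >= len(tc):
--             return result
--         return calculate_sum(tc, i + 1, result + power_of_four(tc[i]))
--
--     return process_test_cases(test_cases, index + 1, results + [calculate_sum(tc)])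
-- ===== SOURCE B (Python) =====
-- def power_of_four(n):
--     return n ** 4 if n < 0 else 0
--
-- def process_test_cases(test_cases, index=0, results=[]):
--     out = list(results)
--     for i in range(index, len(test_cases)):
--         tc = test_cases[i]
--         if len(tc) != tc[0] + 1:
--             out.append(-1)
--         else:
--             total = 0
--             for x in tc[1:]:
--                 total += power_of_four(x)
--             out.append(total)
--     return out
-- ===== Notes on version B (the rewrite author's own statement) =====
-- stated objective: simpler
-- what changed: Replaced the pair of tail-recursive helper functions (outer recursion over test-case indices threading a growing results list, inner recursive calculate_sum) with a single iterative function: one for-loop over range(index, len(test_cases)) appending to a fresh copy of results, with an inner loop summing power_of_four over tc[1:].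
import Mathlib
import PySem

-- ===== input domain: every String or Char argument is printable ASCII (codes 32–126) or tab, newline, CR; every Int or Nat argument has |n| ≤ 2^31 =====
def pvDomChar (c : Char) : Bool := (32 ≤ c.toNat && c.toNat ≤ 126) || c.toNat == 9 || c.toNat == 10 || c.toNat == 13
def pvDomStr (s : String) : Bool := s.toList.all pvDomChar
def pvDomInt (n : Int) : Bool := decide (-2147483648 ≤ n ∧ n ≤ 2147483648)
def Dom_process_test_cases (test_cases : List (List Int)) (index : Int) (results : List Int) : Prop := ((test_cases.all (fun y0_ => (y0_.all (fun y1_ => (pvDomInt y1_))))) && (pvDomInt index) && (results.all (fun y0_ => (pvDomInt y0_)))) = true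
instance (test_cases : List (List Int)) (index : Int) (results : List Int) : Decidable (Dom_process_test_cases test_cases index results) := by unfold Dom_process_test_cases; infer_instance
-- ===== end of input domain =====

-- B is an iterative rewrite (index loop + inner fold) of A's tail recursion; same return value, no mutation of `results`.

-- ===== PORT A =====
def power_of_four (n : Int) : Int := if n < 0 then n ^ 4 else 0

def calculate_sum (tc : List Int) (i : Int) (result : Int) : Int :=
  if _h : i ≥ (tc.length : Int) then result
  else calculate_sum tc (i + 1) (result + power_of_four (PySem.List.pyGetD tc i 0))
termination_by ((tc.length : Int) - i).toNat
decreasing_by omega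

def process_test_cases (test_cases : List (List Int)) (index : Int) (results : List Int) : List Int :=
  if _h : index ≥ (test_cases.length : Int) then results
  else
    match PySem.List.pyGet? test_cases index with
    | none => results      -- Python raises IndexError here; excluded by Pre_
    | some tc =>
      match PySem.List.pyGet? tc 0 with
      | none => results    -- Python raises IndexError (empty tc); excluded by Pre_
      | some h0 =>
        if (tc.length : Int) ≠ h0 + 1 then
          process_test_cases test_cases (index + 1) (results ++ [-1])
        else
          process_test_cases test_cases (index + 1) (results ++ [calculate_sum tc 1 0])
termination_by ((test_cases.length : Int) - index).toNat
decreasing_by all_goals omega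

-- ===== PORT B =====
def process_test_cases_alt (test_cases : List (List Int)) (index : Int) (results : List Int) : List Int :=
  (PySem.List.pyRange index (test_cases.length : Int) 1).foldl (fun out i =>
    match PySem.List.pyGet? test_cases i with
    | none => out          -- IndexError in Python; excluded by Pre_
    | some tc =>
      match PySem.List.pyGet? tc 0 with
      | none => out        -- IndexError in Python; excluded by Pre_
      | some h0 =>
        if (tc.length : Int) ≠ h0 + 1 then out ++ [-1]
        else out ++ [(PySem.List.slice tc (some 1) none).foldl
                       (fun total x => total + power_of_four x) 0]) results

-- ===== PRECONDITION & SPEC =====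
-- Pre_ excludes exactly the inputs on which Python A raises (IndexError on an access
-- test_cases[i], i in range(index, len), with i < -len or test_cases[i] empty; or unbounded
-- recursion depth for index far below -len): either the range is empty, or index ≥ -len and
-- every test case actually reached (the suffix from max(index,0)) is nonempty.
def Pre_process_test_cases (test_cases : List (List Int)) (index : Int) (results : List Int) : Prop :=
  (test_cases.length : Int) ≤ index ∨
    (-(test_cases.length : Int) ≤ index ∧ ∀ tc ∈ test_cases.drop index.toNat, tc ≠ [])
instance (test_cases : List (List Int)) (index : Int) (results : List Int) : Decidable (Pre_process_test_cases test_cases index results) := by unfold Pre_process_test_cases; infer_instance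

def pvWitness_process_test_cases : List (List Int) × Int × List Int := ([[2, -1, 3], [1]], 0, [7])

def Spec_process_test_cases (test_cases : List (List Int)) (index : Int) (results : List Int) (out : List Int) : Prop := out = process_test_cases_alt test_cases index results
instance (test_cases : List (List Int)) (index : Int) (results : List Int) (out : List Int) : Decidable (Spec_process_test_cases test_cases index results out) := by unfold Spec_process_test_cases; infer_instance

-- ===== CLAIM (what is proved, stated in full; the proofs are below) =====
def Claim_equal_process_test_cases : Prop := ∀ (test_cases : List (List Int)) (index : Int) (results : List Int), Dom_process_test_cases test_cases index results → Pre_process_test_cases test_cases index results → Spec_process_test_cases test_cases index results (process_test_cases test_cases index results)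

-- ===== LEMMAS AND PROOFS =====

theorem calculate_sum_eq_foldl (tc : List Int) (i : Int) (r : Int) (hi : 0 ≤ i) :
    calculate_sum tc i r
      = (tc.drop i.toNat).foldl (fun total x => total + power_of_four x) r := by
  fun_induction calculate_sum tc i r with
  | case1 i r h =>
    rw [List.drop_eq_nil_of_le (by omega)]
    simp
  | case2 i r h ih =>
    rw [ih (by omega)]
    have hlt : i.toNat < tc.length := by omega
    rw [show (i + 1).toNat = i.toNat + 1 from by omega, List.drop_eq_getElem_cons hlt,
        List.foldl_cons, PySem.List.pyGetD_eq_getElem (xs := tc) (i := i) (d := 0) hi (by omega)]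

theorem process_eq_foldl (test_cases : List (List Int)) (index : Int) (results : List Int)
    (hpre : ∀ i ∈ PySem.List.pyRange index (test_cases.length : Int) 1,
      (PySem.List.pyGet? test_cases i).getD [] ≠ []) :
    process_test_cases test_cases index results
      = process_test_cases_alt test_cases index results := by
  unfold process_test_cases_alt
  fun_induction process_test_cases test_cases index results with
  | case1 index results h =>
    rw [PySem.List.pyRange_one_eq_nil (by omega), List.foldl_nil]
  | case2 index results h hget =>
    exfalso
    have := hpre index (by rw [PySem.List.mem_pyRange_one]; omega)
    rw [hget] at this
    exact this rfl
  | case3 index results h tc hget hget0 =>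
    exfalso
    have := hpre index (by rw [PySem.List.mem_pyRange_one]; omega)
    rw [hget] at this
    cases tc with
    | nil => exact this rfl
    | cons a l => simp at hget0
  | case4 index results h tc hget h0 hget0 hne ih =>
    rw [PySem.List.pyRange_one_cons (by omega), List.foldl_cons, hget]
    simp only [hget0, if_pos hne]
    apply ih
    intro i hi
    exact hpre i (by rw [PySem.List.pyRange_one_cons (by omega)]; exact List.mem_cons_of_mem _ hi)
  | case5 index results h tc hget h0 hget0 hne ih =>
    rw [PySem.List.pyRange_one_cons (by omega), List.foldl_cons, hget]
    simp only [hget0, if_neg hne]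
    have hc : calculate_sum tc 1 0
        = List.foldl (fun total x => total + power_of_four x) 0 tc.tail := by
      rw [calculate_sum_eq_foldl tc 1 0 (by omega)]
      norm_num [List.drop_one]
    rw [PySem.List.slice_from_one, ← hc]
    apply ih
    intro i hi
    exact hpre i (by rw [PySem.List.pyRange_one_cons (by omega)]; exact List.mem_cons_of_mem _ hi)

theorem pre_pointwise (tcs : List (List Int)) (index : Int) (results : List Int)
    (h : Pre_process_test_cases tcs index results) :
    ∀ i ∈ PySem.List.pyRange index (tcs.length : Int) 1,
      (PySem.List.pyGet? tcs i).getD [] ≠ [] := by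
  intro i hi
  rw [PySem.List.mem_pyRange_one] at hi
  unfold Pre_process_test_cases at h
  rcases h with h | ⟨hlo, hall⟩
  · omega
  · by_cases hidx : 0 ≤ index
    · have h0i : 0 ≤ i := le_trans hidx hi.1
      have hlt : i.toNat < tcs.length := by omega
      rw [PySem.List.pyGet?_of_nonneg (xs := tcs) (i := i) h0i, List.getElem?_eq_getElem hlt]
      simp only [Option.getD_some]
      apply hall
      have hidx' : index.toNat + (i.toNat - index.toNat) < tcs.length := by omega
      have : tcs[i.toNat] = (tcs.drop index.toNat)[i.toNat - index.toNat]'(by simp; omega) := by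
        rw [List.getElem_drop]
        congr 1
        omega
      rw [this]
      exact List.getElem_mem _
    · have hz : index.toNat = 0 := by omega
      rw [hz, List.drop_zero] at hall
      cases hg : PySem.List.pyGet? tcs i with
      | none =>
        rw [PySem.List.pyGet?_eq_none_iff] at hg
        exact absurd (by simp [PySem.Raise.InRange]; omega) hg
      | some tc =>
        simp only [Option.getD_some]
        exact hall tc (PySem.List.mem_of_pyGet?_eq_some (xs := tcs) (i := i) hg)

-- ===== VERDICT (by name: the statement is the Claim_ definition above) =====
theorem process_test_cases_spec : Claim_equal_process_test_cases := by
  intro tcs index results _hdom hpre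
  exact process_eq_foldl tcs index results (pre_pointwise tcs index results hpre)
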